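-- pv_equiv track=rewrite | github.com/drahmuty/Algorithm-Design-Manual | 02-03 "Light, More Light".py | light
-- ===== SOURCE A (Python) =====
-- def light(n):
--     x = 0
--     for i in range(1, n+1):
--         if n % i == 0:
--             x += 1
--     if x % 2 == 0:
--         return 'off'
--     else:
--         return 'on'
-- ===== SOURCE B (Python) =====
-- def light(n):
--     # Bulb is on iff n has an odd number of divisors, i.e. iff n is a perfect square.
--     if n <= 0:
--         return 'off'
--     r = 0
--     while (r + 1) * (r + 1) <= n:
--         r += 1
--     return 'on' if r * r == n else 'off'
-- ===== Notes on version B (the rewrite author's own statement) =====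
-- stated objective: faster
-- what changed: Replaces the O(n) divisor-counting loop by the perfect-square test (odd divisor count iff perfect square), computing the integer square root with an O(sqrt n) incrementing loop.
import Mathlib
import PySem

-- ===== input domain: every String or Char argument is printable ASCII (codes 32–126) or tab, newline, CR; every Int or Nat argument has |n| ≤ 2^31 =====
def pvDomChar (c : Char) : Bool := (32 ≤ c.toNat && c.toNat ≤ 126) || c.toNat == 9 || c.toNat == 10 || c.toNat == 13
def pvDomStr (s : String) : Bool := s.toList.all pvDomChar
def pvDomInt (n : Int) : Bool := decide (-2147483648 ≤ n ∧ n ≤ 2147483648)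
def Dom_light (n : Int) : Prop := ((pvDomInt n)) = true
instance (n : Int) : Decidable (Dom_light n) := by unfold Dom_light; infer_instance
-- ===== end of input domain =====

-- B replaces A's O(n) divisor-counting loop by the perfect-square test (odd divisor
-- count iff perfect square), finding the integer square root with an O(√n) loop.

-- ===== PORT A =====
def light (n : Int) : String :=
  let x : Int := (PySem.List.pyRange 1 (n + 1) 1).foldl
      (fun x i => if PySem.Int.mod n i = 0 then x + 1 else x) 0
  if PySem.Int.mod x 2 = 0 then "off" else "on"

-- ===== PORT B =====
-- termination fact for B's while-loop: if (r+1)² ≤ n the loop continues and n - r shrinks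
lemma lightLoop_dec {n r : Int} (h : (r + 1) * (r + 1) ≤ n) :
    (n - (r + 1)).toNat < (n - r).toNat := by
  have : r < n := by nlinarith [mul_self_nonneg (r + 1), mul_self_nonneg r]
  omega

def lightLoop (n r : Int) : Int :=
  if h : (r + 1) * (r + 1) ≤ n then lightLoop n (r + 1) else r
termination_by (n - r).toNat
decreasing_by exact lightLoop_dec h

def light_alt (n : Int) : String :=
  if n ≤ 0 then "off"
  else if lightLoop n 0 * lightLoop n 0 = n then "on" else "off"

-- ===== PRECONDITION & SPEC =====
def Spec_light (n : Int) (out : String) : Prop := out = light_alt n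
instance (n : Int) (out : String) : Decidable (Spec_light n out) := by unfold Spec_light; infer_instance

-- ===== CLAIM (what is proved, stated in full; the proofs are below) =====
def Claim_equal_light : Prop := ∀ (n : Int), Dom_light n → Spec_light n (light n)

-- ===== LEMMAS AND PROOFS =====

-- B's loop computes the integer square root
lemma lightLoop_spec_aux (n : Int) (fu : ℕ) : ∀ r : Int, (n - r).toNat ≤ fu → 0 ≤ r → r * r ≤ n →
    0 ≤ lightLoop n r ∧ lightLoop n r * lightLoop n r ≤ n ∧
      n < (lightLoop n r + 1) * (lightLoop n r + 1) := by
  induction fu with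
  | zero =>
    intro r hle hr hrr
    by_cases h : (r + 1) * (r + 1) ≤ n
    · exact absurd (lightLoop_dec h) (by omega)
    · rw [lightLoop, dif_neg h]
      exact ⟨hr, hrr, lt_of_not_ge h⟩
  | succ fu ih =>
    intro r hle hr hrr
    by_cases h : (r + 1) * (r + 1) ≤ n
    · rw [lightLoop, dif_pos h]
      exact ih (r + 1) (by have := lightLoop_dec h; omega) (by omega) h
    · rw [lightLoop, dif_neg h]
      exact ⟨hr, hrr, lt_of_not_ge h⟩

lemma lightLoop_spec (n : Int) (hn : 0 ≤ n) :
    0 ≤ lightLoop n 0 ∧ lightLoop n 0 * lightLoop n 0 ≤ n ∧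
      n < (lightLoop n 0 + 1) * (lightLoop n 0 + 1) :=
  lightLoop_spec_aux n (n - 0).toNat 0 le_rfl le_rfl (by omega)

-- squeeze: a square k² lying in [R², (R+1)²) with R, k ≥ 0 forces R = k
lemma sq_squeeze {R k n : Int} (hR : 0 ≤ R) (hk : 0 ≤ k) (h1 : R * R ≤ n)
    (h2 : n < (R + 1) * (R + 1)) (hkn : k * k = n) : R = k := by
  rcases lt_trichotomy R k with h | h | h
  · nlinarith
  · exact h
  · nlinarith

-- a fixed-point-free involution d ↦ m/d on t makes t even
lemma even_card_of_pairing (m : ℕ) (hm : m ≠ 0) (t : Finset ℕ)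
    (ht : ∀ d ∈ t, d ∣ m ∧ m / d ∈ t ∧ m / d ≠ d) : Even t.card := by
  have h0 : ∑ _d ∈ t, (1 : ZMod 2) = 0 := by
    refine Finset.sum_involution (fun d _ => m / d) (fun a _ => by decide)
      (fun a ha h => (ht a ha).2.2) (fun a ha => (ht a ha).2.1) ?_
    intro a ha
    exact Nat.div_div_self (ht a ha).1 hm
  rw [Finset.sum_const, nsmul_eq_mul, mul_one] at h0
  exact even_iff_two_dvd.mpr (Fin.natCast_eq_zero.mp h0)

-- the classical fact: a positive integer has an odd number of divisors iff it is a square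
lemma odd_card_divisors_iff (m : ℕ) (hm : m ≠ 0) : Odd m.divisors.card ↔ IsSquare m := by
  constructor
  · intro hodd
    by_contra hsq
    refine (Nat.not_even_iff_odd.mpr hodd) (even_card_of_pairing m hm m.divisors ?_)
    intro d hd
    have hdvd : d ∣ m := Nat.dvd_of_mem_divisors hd
    refine ⟨hdvd, Nat.mem_divisors.mpr ⟨Nat.div_dvd_of_dvd hdvd, hm⟩, ?_⟩
    intro hfix
    exact hsq ⟨d, by rw [← Nat.div_mul_cancel hdvd, hfix]⟩
  · rintro ⟨r, rfl⟩
    have hr : r ≠ 0 := by rintro rfl; exact hm rfl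
    have hrmem : r ∈ (r * r).divisors := Nat.mem_divisors.mpr ⟨⟨r, rfl⟩, hm⟩
    have heven : Even ((r * r).divisors.erase r).card := by
      refine even_card_of_pairing (r * r) hm _ ?_
      intro d hd
      have hdm : d ∈ (r * r).divisors := Finset.mem_of_mem_erase hd
      have hdr : d ≠ r := Finset.ne_of_mem_erase hd
      have hdvd : d ∣ r * r := Nat.dvd_of_mem_divisors hdm
      have hself : d * (r * r / d) = r * r := Nat.mul_div_cancel' hdvd
      refine ⟨hdvd, Finset.mem_erase.mpr ⟨?_, Nat.mem_divisors.mpr ⟨Nat.div_dvd_of_dvd hdvd, hm⟩⟩, ?_⟩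
      · intro hq
        apply hdr
        have hinv : r * r / (r * r / d) = d := Nat.div_div_self hdvd hm
        rw [hq] at hinv
        rw [← hinv, Nat.mul_div_cancel_left _ (Nat.pos_of_ne_zero hr)]
      · intro hq
        rw [hq] at hself
        exact hdr (Nat.mul_self_inj.mp hself)
    have hcard : (r * r).divisors.card = ((r * r).divisors.erase r).card + 1 :=
      (Finset.card_erase_add_one hrmem).symm
    rw [hcard]
    exact Even.add_one heven

-- A's loop counts the divisors of n
lemma countA (m : ℕ) (hm : 0 < m) :
    (PySem.List.pyRange 1 ((m : Int) + 1) 1).foldl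
      (fun x i => if PySem.Int.mod (m : Int) i = 0 then x + 1 else x) (0 : Int)
      = (m.divisors.card : Int) := by
  rw [PySem.List.foldl_ite_add_one, zero_add]
  congr 1
  rw [PySem.List.pyRange_one, List.countP_map]
  have hlen : ((m : Int) + 1 - 1).toNat = m := by omega
  rw [hlen]
  have hc1 : (List.range m).countP
      ((fun i : Int => decide (PySem.Int.mod (m : Int) i = 0)) ∘ fun k : ℕ => 1 + (k : Int))
      = (List.range m).countP (fun k => decide ((1 + k) ∣ m)) := by
    refine List.countP_congr ?_
    intro k _
    simp only [Function.comp, decide_eq_true_eq]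
    rw [PySem.Int.mod_eq_zero_iff_dvd]
    have h1 : (1 + (k : Int)) = ((1 + k : ℕ) : Int) := by push_cast; ring
    rw [h1, Int.natCast_dvd_natCast]
  rw [hc1]
  have hdiv : m.divisors.card = (List.range' 1 m).countP (fun d => decide (d ∣ m)) := by
    rw [Nat.divisors, Nat.Ico_eq_range']
    have h1 : m + 1 - 1 = m := by omega
    simp [h1, Finset.filter, Finset.card, Multiset.filter_coe, List.countP_eq_length_filter]
  rw [hdiv, List.range'_eq_map_range, List.countP_map]
  rfl

-- ===== VERDICT (by name: the statement is the Claim_ definition above) =====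
theorem light_spec : Claim_equal_light := by
  intro n _
  unfold Spec_light light light_alt
  by_cases hn : n ≤ 0
  · rw [PySem.List.pyRange_one_eq_nil (by omega), if_pos hn]
    simp [PySem.Int.mod]
  · have hn' : 0 < n := lt_of_not_ge hn
    set m : ℕ := n.toNat with hmdef
    have hnm : n = (m : Int) := by omega
    have hx : (PySem.List.pyRange 1 (n + 1) 1).foldl
        (fun x i => if PySem.Int.mod n i = 0 then x + 1 else x) (0 : Int)
        = (m.divisors.card : Int) := by
      rw [hnm]; exact countA m (by omega)
    rw [hx, if_neg hn]
    obtain ⟨hR0, hRle, hRlt⟩ := lightLoop_spec n (by omega)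
    have hkey : (lightLoop n 0 * lightLoop n 0 = n) ↔ IsSquare m := by
      constructor
      · intro h
        refine ⟨(lightLoop n 0).toNat, ?_⟩
        have hcast : (((lightLoop n 0).toNat * (lightLoop n 0).toNat : ℕ) : Int) = n := by
          push_cast
          rw [Int.toNat_of_nonneg hR0]
          exact h
        omega
      · rintro ⟨k, hk⟩
        have hkk : (k : Int) * (k : Int) = n := by rw [hnm, hk]; push_cast; ring
        have hRk := sq_squeeze hR0 (by positivity) hRle hRlt hkk
        rw [hRk]; exact hkk
    have hpar : (PySem.Int.mod ((m.divisors.card : ℕ) : Int) 2 = 0) ↔ ¬ IsSquare m := by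
      rw [PySem.Int.mod_eq_zero_iff_dvd]
      rw [show (2 : Int) = ((2 : ℕ) : Int) from rfl, Int.natCast_dvd_natCast]
      rw [← even_iff_two_dvd, ← Nat.not_odd_iff_even, odd_card_divisors_iff m (by omega)]
    by_cases hsq : IsSquare m
    · rw [if_neg (by rw [hpar]; simpa using hsq), if_pos (hkey.mpr hsq)]
    · rw [if_pos (hpar.mpr hsq), if_neg (fun h => hsq (hkey.mp h))]
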